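-- pv_equiv track=rewrite | github.com/peg-top/mooc-programming-25 | part05-26_student_database/src/student_database.py | cleaned_courses
-- ===== SOURCE A (Python) =====
-- def cleaned_courses(courses: list):
--
--     cleaned = {}
--
--     for course, grade in courses:
--         if grade != 0:
--             if course not in cleaned:
--                 cleaned[course] = grade
--             else:
--                 if cleaned[course] < grade:
--                     cleaned[course] = grade
--
--     cleaned_courses = []
--
--     for key, value in cleaned.items():
--         cleaned_courses.append([key, value])
--
--     return cleaned_courses
-- ===== SOURCE B (Python) =====
-- def cleaned_courses(courses: list):
--     # Pass 1: ordered list of distinct courses having at least one nonzero grade,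
--     # in order of first nonzero appearance.
--     order = []
--     for course, grade in courses:
--         if grade != 0 and course not in order:
--             order.append(course)
--     # Pass 2: for each such course, rescan all pairs and take the max nonzero grade.
--     return [[course, max(g for c, g in courses if c == course and g != 0)]
--             for course in order]
-- ===== Notes on version B (the rewrite author's own statement) =====
-- stated objective: alternative
-- what changed: Replaces A's single dict-grouping pass (running max per key, then items dump) by a distinct-course order pass plus, per course, a full rescan taking max over its nonzero grades.
import Mathlib
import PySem

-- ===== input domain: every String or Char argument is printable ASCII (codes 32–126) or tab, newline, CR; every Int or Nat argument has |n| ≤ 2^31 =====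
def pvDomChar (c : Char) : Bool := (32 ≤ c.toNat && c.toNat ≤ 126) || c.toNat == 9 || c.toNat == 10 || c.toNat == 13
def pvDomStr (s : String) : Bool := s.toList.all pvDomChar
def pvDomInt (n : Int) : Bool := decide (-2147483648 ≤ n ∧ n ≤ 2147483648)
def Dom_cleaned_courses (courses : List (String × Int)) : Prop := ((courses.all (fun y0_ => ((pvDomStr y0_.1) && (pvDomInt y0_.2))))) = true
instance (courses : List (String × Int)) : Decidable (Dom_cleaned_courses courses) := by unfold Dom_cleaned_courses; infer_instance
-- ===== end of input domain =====

-- B rebuilds the result from an ordered distinct-course pass plus per-course rescans,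
-- instead of A's single dict-grouping pass; same values, alternative structure.

-- ===== PORT A =====
-- the body of A's first loop (dict 'cleaned' updated per (course, grade))
def pvStepA (d : PySem.Dict String Int) (p : String × Int) : PySem.Dict String Int :=
  if p.2 ≠ 0 then
    if !(d.contains p.1) then d.insert p.1 p.2
    -- Python reads cleaned[course]; the key is present here, so getD _ 0 is exact
    else if d.getD p.1 0 < p.2 then d.insert p.1 p.2
    else d
  else d

def cleaned_courses (courses : List (String × Int)) : List (String × Int) :=
  let cleaned := courses.foldl pvStepA PySem.Dict.empty
  -- second loop: append [key, value] for each item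
  cleaned.items.foldl (fun acc kv => acc ++ [(kv.1, kv.2)]) []

-- ===== PORT B =====
-- pass 1 of Source B: ordered distinct courses with a nonzero grade
def pvOrderStep (acc : List String) (p : String × Int) : List String :=
  if p.2 ≠ 0 ∧ p.1 ∉ acc then acc ++ [p.1] else acc

def pvOrderB (courses : List (String × Int)) : List String :=
  courses.foldl pvOrderStep []

-- the generator [g for c, g in courses if c == course and g != 0]
def pvMatched (courses : List (String × Int)) (c : String) : List Int :=
  (courses.filter (fun p => p.1 == c && p.2 != 0)).map (fun p => p.2)

-- max(...) over that generator; the [] case is unreachable for courses drawn from pvOrderB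
def pvMaxNonzero (courses : List (String × Int)) (c : String) : Int :=
  match PySem.List.max? (pvMatched courses c) (fun g => g) with
  | none => 0
  | some m => m

def cleaned_courses_alt (courses : List (String × Int)) : List (String × Int) :=
  (pvOrderB courses).map (fun c => (c, pvMaxNonzero courses c))

-- ===== PRECONDITION & SPEC =====
def Spec_cleaned_courses (courses : List (String × Int)) (out : List (String × Int)) : Prop := out = cleaned_courses_alt courses
instance (courses : List (String × Int)) (out : List (String × Int)) : Decidable (Spec_cleaned_courses courses out) := by unfold Spec_cleaned_courses; infer_instance

-- ===== CLAIM (what is proved, stated in full; the proofs are below) =====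
def Claim_equal_cleaned_courses : Prop := ∀ (courses : List (String × Int)), Dom_cleaned_courses courses → Spec_cleaned_courses courses (cleaned_courses courses)

-- ===== LEMMAS AND PROOFS =====

theorem pvOrderB_append (xs : List (String × Int)) (p : String × Int) :
    pvOrderB (xs ++ [p]) = pvOrderStep (pvOrderB xs) p := by
  simp [pvOrderB, List.foldl_append]

theorem pvMatched_append (xs : List (String × Int)) (p : String × Int) (c : String) :
    pvMatched (xs ++ [p]) c
      = pvMatched xs c ++ (if p.1 = c ∧ p.2 ≠ 0 then [p.2] else []) := by
  have hsingle : List.filter (fun r => r.1 == c && r.2 != 0) [p]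
      = if p.1 = c ∧ p.2 ≠ 0 then [p] else [] := by
    have h1 : (p.1 == c) = decide (p.1 = c) := by
      by_cases h : p.1 = c <;> simp [h]
    have h2 : (p.2 == 0) = decide (p.2 = 0) := by
      by_cases h : p.2 = 0 <;> simp [h]
    by_cases hc : p.1 = c ∧ p.2 ≠ 0
    · simp [List.filter, h2, bne, hc]
    · rw [if_neg hc]
      rw [Decidable.not_and_iff_not_or_not] at hc
      rcases hc with h | h
      · simp [List.filter, h1, bne, h]
      · simp only [ne_eq, not_not] at h
        simp [List.filter, h1, bne, h]
  simp only [pvMatched, List.filter_append, List.map_append, hsingle]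
  by_cases h : p.1 = c ∧ p.2 ≠ 0 <;> simp [h]

theorem mem_pvOrderB (xs : List (String × Int)) (c : String) :
    c ∈ pvOrderB xs ↔ pvMatched xs c ≠ [] := by
  induction xs using List.reverseRecOn with
  | nil => simp [pvOrderB, pvMatched]
  | append_singleton xs p ih =>
    rw [pvOrderB_append, pvMatched_append, pvOrderStep]
    by_cases h1 : p.1 = c <;> by_cases h2 : p.2 = 0 <;>
      by_cases h3 : p.1 ∈ pvOrderB xs <;>
      simp_all <;> tauto

theorem nodup_pvOrderB (xs : List (String × Int)) : (pvOrderB xs).Nodup := by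
  induction xs using List.reverseRecOn with
  | nil => simp [pvOrderB]
  | append_singleton xs p ih =>
    rw [pvOrderB_append, pvOrderStep]
    by_cases h : p.2 ≠ 0 ∧ p.1 ∉ pvOrderB xs
    · rw [if_pos h]
      refine List.Nodup.append ih (List.nodup_singleton _) ?_
      intro a ha hb
      rw [List.mem_singleton] at hb
      exact h.2 (hb ▸ ha)
    · rw [if_neg h]; exact ih

theorem pvMaxNonzero_cons (xs : List (String × Int)) (c : String) (h : Int) (t : List Int)
    (hm : pvMatched xs c = h :: t) : pvMaxNonzero xs c = t.foldl max h := by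
  simp [pvMaxNonzero, hm, PySem.List.max?_id_cons]

-- the second loop of A dumps the items list unchanged
theorem foldl_append_pairs (l acc : List (String × Int)) :
    l.foldl (fun acc kv => acc ++ [(kv.1, kv.2)]) acc = acc ++ l := by
  induction l generalizing acc with
  | nil => simp
  | cons x t ih => simp [List.foldl_cons, ih]

-- main invariant: A's dict items = B's ordered courses paired with their max nonzero grade
theorem pvDict_items (xs : List (String × Int)) :
    (xs.foldl pvStepA PySem.Dict.empty).items
      = (pvOrderB xs).map (fun c => (c, pvMaxNonzero xs c)) := by
  induction xs using List.reverseRecOn with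
  | nil => simp [pvOrderB, PySem.Dict.empty]
  | append_singleton xs p ih =>
    have hkeys : (xs.foldl pvStepA PySem.Dict.empty).keys = pvOrderB xs := by
      simp [PySem.Dict.keys, ih, Function.comp_def]
    have hnd : (xs.foldl pvStepA PySem.Dict.empty).keys.Nodup := by
      rw [hkeys]; exact nodup_pvOrderB xs
    rw [List.foldl_append, List.foldl_cons, List.foldl_nil, pvOrderB_append, pvOrderStep]
    by_cases hz : p.2 ≠ 0
    · by_cases hmem : p.1 ∈ pvOrderB xs
      · -- course already recorded: dict contains it; order unchanged
        rw [if_neg (fun h => h.2 hmem)]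
        have hcont : (xs.foldl pvStepA PySem.Dict.empty).contains p.1 = true := by
          rw [PySem.Dict.contains_iff_mem_keys, hkeys]; exact hmem
        obtain ⟨h, t, hm⟩ : ∃ h t, pvMatched xs p.1 = h :: t := by
          rcases hx : pvMatched xs p.1 with _ | ⟨h, t⟩
          · exact absurd hx ((mem_pvOrderB xs p.1).mp hmem)
          · exact ⟨h, t, rfl⟩
        have hget : (xs.foldl pvStepA PySem.Dict.empty).getD p.1 0 = pvMaxNonzero xs p.1 :=
          PySem.Dict.getD_of_mem_items _ (by rw [ih]; exact List.mem_map_of_mem hmem) hnd 0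
        have hnew : pvMaxNonzero (xs ++ [p]) p.1 = max (pvMaxNonzero xs p.1) p.2 := by
          have hm' : pvMatched (xs ++ [p]) p.1 = h :: (t ++ [p.2]) := by
            rw [pvMatched_append, hm, if_pos ⟨rfl, hz⟩]; rfl
          rw [pvMaxNonzero_cons _ _ _ _ hm', List.foldl_append,
            ← pvMaxNonzero_cons xs p.1 h t hm]
          simp
        have hother : ∀ c ∈ pvOrderB xs, c ≠ p.1 →
            pvMaxNonzero (xs ++ [p]) c = pvMaxNonzero xs c := by
          intro c _ hc
          have : pvMatched (xs ++ [p]) c = pvMatched xs c := by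
            rw [pvMatched_append, if_neg (fun h' => hc h'.1.symm)]; simp
          simp [pvMaxNonzero, this]
        by_cases hlt : (xs.foldl pvStepA PySem.Dict.empty).getD p.1 0 < p.2
        · -- strictly larger grade: overwrite in place
          have hlt' : pvMaxNonzero xs p.1 < p.2 := by rw [← hget]; exact hlt
          have hstep : pvStepA (xs.foldl pvStepA PySem.Dict.empty) p
              = (xs.foldl pvStepA PySem.Dict.empty).insert p.1 p.2 := by
            simp [pvStepA, hz, hcont, hlt]
          rw [hstep, PySem.Dict.items_insert_of_contains _ _ hcont, ih, List.map_map]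
          apply List.map_congr_left
          intro c hc
          by_cases hceq : c = p.1
          · subst hceq
            simp [hnew, max_eq_right hlt'.le]
          · simp [hceq, hother c hc hceq]
        · -- grade not larger: dict unchanged
          have hmax : max (pvMaxNonzero xs p.1) p.2 = pvMaxNonzero xs p.1 :=
            max_eq_left (by rw [← hget]; omega)
          have hstep : pvStepA (xs.foldl pvStepA PySem.Dict.empty) p
              = xs.foldl pvStepA PySem.Dict.empty := by
            simp [pvStepA, hz, hcont, hlt]
          rw [hstep, ih]
          apply List.map_congr_left
          intro c hc
          by_cases hceq : c = p.1
          · subst hceq; rw [hnew, hmax]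
          · rw [hother c hc hceq]
      · -- fresh course: appended to both the dict and the order list
        rw [if_pos ⟨hz, hmem⟩]
        have hcont : (xs.foldl pvStepA PySem.Dict.empty).contains p.1 = false := by
          rw [Bool.eq_false_iff]
          intro h
          exact hmem (hkeys ▸ (PySem.Dict.contains_iff_mem_keys _ _).mp h)
        have hnilm : pvMatched xs p.1 = [] := by
          by_contra h
          exact hmem ((mem_pvOrderB xs p.1).mpr h)
        have hself : pvMaxNonzero (xs ++ [p]) p.1 = p.2 := by
          have hm' : pvMatched (xs ++ [p]) p.1 = [p.2] := by
            rw [pvMatched_append, hnilm, if_pos ⟨rfl, hz⟩]; rfl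
          rw [pvMaxNonzero_cons _ _ _ _ hm']; rfl
        have hstep : pvStepA (xs.foldl pvStepA PySem.Dict.empty) p
            = (xs.foldl pvStepA PySem.Dict.empty).insert p.1 p.2 := by
          simp [pvStepA, hz, hcont]
        rw [hstep, PySem.Dict.items_insert_of_not_contains _ _ hcont, ih]
        rw [List.map_append, List.map_cons, List.map_nil, hself]
        congr 1
        apply List.map_congr_left
        intro c hc
        have hceq : c ≠ p.1 := fun h => hmem (h ▸ hc)
        have : pvMatched (xs ++ [p]) c = pvMatched xs c := by
          rw [pvMatched_append, if_neg (fun h' => hceq h'.1.symm)]; simp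
        simp [pvMaxNonzero, this]
    · -- zero grade: nothing changes on either side
      simp only [ne_eq, not_not] at hz
      rw [if_neg (fun h => h.1 hz)]
      have hmx : ∀ c, pvMaxNonzero (xs ++ [p]) c = pvMaxNonzero xs c := by
        intro c
        have : pvMatched (xs ++ [p]) c = pvMatched xs c := by
          rw [pvMatched_append, if_neg (fun h' => h'.2 hz)]; simp
        simp [pvMaxNonzero, this]
      have hstep : pvStepA (xs.foldl pvStepA PySem.Dict.empty) p
          = xs.foldl pvStepA PySem.Dict.empty := by
        simp [pvStepA, hz]
      rw [hstep, ih]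
      simp [hmx]

-- ===== VERDICT (by name: the statement is the Claim_ definition above) =====
theorem cleaned_courses_spec : Claim_equal_cleaned_courses := by
  intro courses _
  unfold Spec_cleaned_courses cleaned_courses cleaned_courses_alt
  rw [foldl_append_pairs, pvDict_items]
  simp
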